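-- pv_equiv track=rewrite | github.com/bchumakset/chord_generator | chord_generator.py | get_chords
-- ===== SOURCE A (Python) =====
-- NOTE_FREQUENCIES = {
--     "C": 261.63,
--     "C#": 277.18,
--     "D": 293.66,
--     "D#": 311.13,
--     "E": 329.63,
--     "F": 349.23,
--     "F#": 369.99,
--     "G": 392.00,
--     "G#": 415.30,
--     "A": 440.00,
--     "A#": 466.16,
--     "B": 493.88,
-- }
--
-- ROOT_NOTE_SEQUENCE = {
--     "I": "C",
--     "II": "D",
--     "III": "E",
--     "IV": "F",
--     "V": "G",
--     "VI": "A",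
--     "VII": "B",
-- }
--
-- def get_note_by_step(note, steps):
--     notes_list = list(NOTE_FREQUENCIES.keys())
--     index = notes_list.index(note)
--     new_index = (index + steps) % len(notes_list)
--     return notes_list[new_index]
--
-- def get_chords(progression):
--     chords = []
--     for chord in progression:
--         root_note = ROOT_NOTE_SEQUENCE[chord.upper()]
--         second_note_step = 4 if chord.isupper() else 3  # is upper means it's major
--         second_note = get_note_by_step(root_note, second_note_step)
--         third_note = get_note_by_step(root_note, 7)
--         chords.append([root_note, second_note, third_note])
--     return chords
-- ===== SOURCE B (Python) =====
-- _NOTES = ["C", "C#", "D", "D#", "E", "F", "F#", "G", "G#", "A", "A#", "B"]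
-- _ROOT_INDEX = {"I": 0, "II": 2, "III": 4, "IV": 5, "V": 7, "VI": 9, "VII": 11}
--
-- # one precomputed table: roman numeral -> (major triad, minor triad)
-- CHORD_TABLE = {
--     r: ([_NOTES[i], _NOTES[(i + 4) % 12], _NOTES[(i + 7) % 12]],
--         [_NOTES[i], _NOTES[(i + 3) % 12], _NOTES[(i + 7) % 12]])
--     for r, i in _ROOT_INDEX.items()
-- }
--
-- def get_chords(progression):
--     return [list(CHORD_TABLE[chord.upper()][0 if chord.isupper() else 1])
--             for chord in progression]
-- ===== Notes on version B (the rewrite author's own statement) =====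
-- stated objective: simpler
-- what changed: B precomputes once a table mapping each roman numeral to its (major, minor) triad via chromatic modular arithmetic, so the per-chord work is a single dict lookup plus a copy instead of three list.index scans through the note list.
-- outside the precondition, e.g. on get_chords(['VIII']): A raises KeyError, B raises KeyError
import Mathlib
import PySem

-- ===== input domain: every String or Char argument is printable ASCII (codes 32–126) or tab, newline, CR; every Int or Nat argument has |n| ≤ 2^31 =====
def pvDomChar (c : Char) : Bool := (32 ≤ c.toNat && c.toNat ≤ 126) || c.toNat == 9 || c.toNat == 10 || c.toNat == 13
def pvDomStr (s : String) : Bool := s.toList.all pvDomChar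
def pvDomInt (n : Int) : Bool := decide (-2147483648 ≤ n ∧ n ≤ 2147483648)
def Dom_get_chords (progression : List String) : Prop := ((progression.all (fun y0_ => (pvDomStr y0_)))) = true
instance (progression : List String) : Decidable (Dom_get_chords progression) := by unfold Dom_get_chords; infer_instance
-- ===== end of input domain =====

-- B replaces the per-chord index scans of A by one precomputed chord table, looked up per chord (objective: simpler).

-- Python's str.isupper() (exact on the ASCII domain: cased chars are the letters); used by both Pythons via the builtin.
def pyStrIsupper (s : String) : Bool :=
  s.toList.any PySem.Chars.isalpha && s.toList.all (fun c => !(PySem.Chars.islower c))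

-- ===== PORT A =====
def noteNames : List String :=
  ["C", "C#", "D", "D#", "E", "F", "F#", "G", "G#", "A", "A#", "B"]

def rootNoteSequence : PySem.Dict String String :=
  PySem.Dict.ofList [("I","C"),("II","D"),("III","E"),("IV","F"),("V","G"),("VI","A"),("VII","B")]

-- list(NOTE_FREQUENCIES.keys()).index(note) never fails for the notes A passes in; the .getD defaults are unreachable under Pre_.
def get_note_by_step (note : String) (steps : Int) : String :=
  let notes_list := noteNames
  let index : Int := ((PySem.List.index? notes_list note).getD 0 : Nat)
  let new_index := PySem.Int.mod (index + steps) (notes_list.length : Int)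
  (PySem.List.pyGet? notes_list new_index).getD ""

def get_chords (progression : List String) : List (List String) :=
  progression.foldl (fun chords chord =>
    let root_note := (rootNoteSequence.get? (PySem.Str.upper chord)).getD ""  -- KeyError excluded by Pre_
    let second_note_step : Int := if pyStrIsupper chord then 4 else 3
    let second_note := get_note_by_step root_note second_note_step
    let third_note := get_note_by_step root_note 7
    chords ++ [[root_note, second_note, third_note]]) []

-- ===== PORT B =====
def bNotes : List String :=
  ["C", "C#", "D", "D#", "E", "F", "F#", "G", "G#", "A", "A#", "B"]

def bRootIndex : List (String × Nat) :=
  [("I",0),("II",2),("III",4),("IV",5),("V",7),("VI",9),("VII",11)]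

def chordTable : PySem.Dict String (List String × List String) :=
  PySem.Dict.ofList (bRootIndex.map (fun p =>
    (p.1, ([bNotes.getD p.2 "", bNotes.getD ((p.2 + 4) % 12) "", bNotes.getD ((p.2 + 7) % 12) ""],
           [bNotes.getD p.2 "", bNotes.getD ((p.2 + 3) % 12) "", bNotes.getD ((p.2 + 7) % 12) ""]))))

def get_chords_alt (progression : List String) : List (List String) :=
  progression.map (fun chord =>
    let t := (chordTable.get? (PySem.Str.upper chord)).getD ([], [])  -- KeyError excluded by Pre_
    if pyStrIsupper chord then t.1 else t.2)

-- ===== PRECONDITION & SPEC =====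
-- Pre_ excludes exactly the chords whose upper-cased name is not a roman numeral I..VII: both Pythons raise KeyError there.
def Pre_get_chords (progression : List String) : Prop :=
  ∀ c ∈ progression, PySem.Str.upper c ∈ (["I","II","III","IV","V","VI","VII"] : List String)
instance (progression : List String) : Decidable (Pre_get_chords progression) := by unfold Pre_get_chords; infer_instance

def pvWitness_get_chords : List String := ["I", "iv", "V", "Ii"]

def Spec_get_chords (progression : List String) (out : List (List String)) : Prop := out = get_chords_alt progression
instance (progression : List String) (out : List (List String)) : Decidable (Spec_get_chords progression out) := by unfold Spec_get_chords; infer_instance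

-- ===== CLAIM (what is proved, stated in full; the proofs are below) =====
def Claim_equal_get_chords : Prop := ∀ (progression : List String), Dom_get_chords progression → Pre_get_chords progression → Spec_get_chords progression (get_chords progression)

-- ===== LEMMAS AND PROOFS =====

-- The per-chord body of A, named so the foldl-to-map lemma applies.
def aBody (chord : String) : List String :=
  let root_note := (rootNoteSequence.get? (PySem.Str.upper chord)).getD ""
  let second_note_step : Int := if pyStrIsupper chord then 4 else 3
  [root_note, get_note_by_step root_note second_note_step, get_note_by_step root_note 7]

def bBody (chord : String) : List String :=
  let t := (chordTable.get? (PySem.Str.upper chord)).getD ([], [])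
  if pyStrIsupper chord then t.1 else t.2

lemma get_chords_eq_map (progression : List String) :
    get_chords progression = progression.map aBody := by
  unfold get_chords
  rw [PySem.List.foldl_append_singleton_eq_map]
  rfl

lemma body_eq (c : String)
    (h : PySem.Str.upper c ∈ (["I","II","III","IV","V","VI","VII"] : List String)) :
    aBody c = bBody c := by
  simp only [List.mem_cons, List.not_mem_nil, or_false] at h
  rcases h with h | h | h | h | h | h | h <;>
    · unfold aBody bBody
      rw [h]
      by_cases hu : pyStrIsupper c <;> simp [hu] <;> decide

theorem get_chords_spec : Claim_equal_get_chords := by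
  intro progression _ hpre
  unfold Spec_get_chords
  rw [get_chords_eq_map, get_chords_alt]
  exact List.map_congr_left fun c hc => body_eq c (hpre c hc)
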